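-- pv_equiv track=rewrite | github.com/Coolgiserz/Awesome-Traffic-Prediction | scripts/check_readme_sync.py | count_table_rows
-- ===== SOURCE A (Python) =====
-- def find_section(lines: list[str], headings: tuple[str, ...]) -> int:
--     for i, line in enumerate(lines):
--         s = line.strip()
--         for h in headings:
--             if s == h or s.startswith(h):
--                 return i
--     return -1
--
-- def get_section_block(lines: list[str], start_idx: int) -> list[str]:
--     if start_idx < 0:
--         return []
--     out: list[str] = []
--     for i in range(start_idx + 1, len(lines)):
--         line = lines[i]
--         if line.startswith("### "):
--             break
--         out.append(line)
--     return out
--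
-- def count_table_rows(lines: list[str], headings: tuple[str, ...]) -> int:
--     start_idx = find_section(lines, headings)
--     block = get_section_block(lines, start_idx)
--     table_lines = [line.strip() for line in block if line.strip().startswith("|")]
--     if len(table_lines) < 3:
--         return 0
--
--     # Expected markdown table shape:
--     # header row
--     # separator row like | --- | --- |
--     # data rows...
--     sep = table_lines[1].replace("|", "").replace(" ", "")
--     if not sep or any(ch not in "-:" for ch in sep):
--         return 0
--     return max(0, len(table_lines) - 2)
-- ===== SOURCE B (Python) =====
-- def count_table_rows(lines: list[str], headings: tuple[str, ...]) -> int: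
--     # One-pass state machine over the lines with constant state: a 'found' flag,
--     # a running count of table rows, and the separator-validity of the 2nd row,
--     # checked per character (no intermediate lists, no string rewriting).
--     found = False
--     n = 0
--     sep_ok = False
--     for line in lines:
--         if not found:
--             s = line.strip()
--             for h in headings:
--                 if s == h or s.startswith(h):
--                     found = True
--                     break
--         else:
--             if line.startswith("### "):
--                 break
--             t = line.strip()
--             if t.startswith("|"):
--                 n += 1
--                 if n == 2:
--                     sep_ok = all(c in "|: -" for c in t) and any(c in "-:" for c in t)
--     if not found or n < 3 or not sep_ok:
--         return 0
--     return n - 2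
-- ===== Notes on version B (the rewrite author's own statement) =====
-- stated objective: alternative
-- what changed: Replaced A's staged passes (find the heading index, rebuild the section block from that index, filter/strip it into a table list, then validate the separator by string rewriting with replace) with a single-pass state machine holding constant state (found flag, row counter, separator-ok flag) that validates the second row per character, building no intermediate lists or strings.
import Mathlib
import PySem

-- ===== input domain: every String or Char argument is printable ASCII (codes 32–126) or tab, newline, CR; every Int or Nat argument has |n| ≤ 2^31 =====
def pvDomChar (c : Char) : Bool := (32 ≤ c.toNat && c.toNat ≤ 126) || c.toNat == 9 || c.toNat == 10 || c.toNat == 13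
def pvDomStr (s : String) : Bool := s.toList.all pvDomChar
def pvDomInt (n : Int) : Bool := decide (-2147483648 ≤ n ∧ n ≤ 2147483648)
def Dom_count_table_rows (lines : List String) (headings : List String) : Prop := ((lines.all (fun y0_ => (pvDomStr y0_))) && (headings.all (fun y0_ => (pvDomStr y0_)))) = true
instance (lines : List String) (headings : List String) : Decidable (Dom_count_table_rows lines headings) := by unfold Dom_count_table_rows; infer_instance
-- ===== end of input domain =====

-- B replaces A's staged passes (heading index, section block, table-line list, replace-based
-- separator rewrite) with one state-machine pass holding constant state; objective: alternative.

-- ===== PORT A =====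
-- for i, line in enumerate(lines): if s == h or s.startswith(h): return i; return -1
def findSectionAux (lines : List String) (headings : List String) (i : Int) : Int :=
  match lines with
  | [] => -1
  | line :: rest =>
    let s := PySem.Str.strip line
    if headings.any (fun h => s == h || PySem.Str.startswith s h) then i
    else findSectionAux rest headings (i + 1)

def find_section (lines : List String) (headings : List String) : Int :=
  findSectionAux lines headings 0

-- loop from start_idx+1 with break on "### "
def sectionLoop (lines : List String) : List String :=
  match lines with
  | [] => []
  | line :: rest =>
    if PySem.Str.startswith line "### " then []
    else line :: sectionLoop rest

def get_section_block (lines : List String) (start_idx : Int) : List String :=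
  if start_idx < 0 then []
  else sectionLoop (lines.drop (start_idx + 1).toNat)

def count_table_rows (lines : List String) (headings : List String) : Int :=
  let start_idx := find_section lines headings
  let block := get_section_block lines start_idx
  let table_lines := (block.filter
      (fun line => PySem.Str.startswith (PySem.Str.strip line) "|")).map PySem.Str.strip
  if table_lines.length < 3 then 0
  else
    let sep := PySem.Str.replace (PySem.Str.replace (table_lines.getD 1 "") "|" "") " " ""
    if sep == "" || sep.toList.any (fun ch => !(ch == '-' || ch == ':')) then 0
    else max 0 ((table_lines.length : Int) - 2)

-- ===== PORT B =====
-- sep_ok for the second table row: all(c in "|: -" for c in t) and any(c in "-:" for c in t)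
def altSepOk (t : String) : Bool :=
  t.toList.all (fun c => "|: -".toList.contains c) && t.toList.any (fun c => "-:".toList.contains c)

-- the single for-loop over lines: state = (found, n, sep_ok); break = return the state
def altLoop (lines : List String) (headings : List String)
    (found : Bool) (n : Int) (sepOk : Bool) : Bool × Int × Bool :=
  match lines with
  | [] => (found, n, sepOk)
  | line :: rest =>
    if found = false then
      let s := PySem.Str.strip line
      if headings.any (fun h => s == h || PySem.Str.startswith s h) then
        altLoop rest headings true n sepOk
      else
        altLoop rest headings false n sepOk
    else
      if PySem.Str.startswith line "### " then (found, n, sepOk)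
      else
        let t := PySem.Str.strip line
        if PySem.Str.startswith t "|" then
          let n' := n + 1
          let sepOk' := if n' == 2 then altSepOk t else sepOk
          altLoop rest headings found n' sepOk'
        else altLoop rest headings found n sepOk

def count_table_rows_alt (lines : List String) (headings : List String) : Int :=
  let st := altLoop lines headings false 0 false
  if st.1 = false ∨ st.2.1 < 3 ∨ st.2.2 = false then 0
  else st.2.1 - 2

-- ===== PRECONDITION & SPEC =====
def Spec_count_table_rows (lines : List String) (headings : List String) (out : Int) : Prop := out = count_table_rows_alt lines headings
instance (lines : List String) (headings : List String) (out : Int) : Decidable (Spec_count_table_rows lines headings out) := by unfold Spec_count_table_rows; infer_instance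

-- ===== CLAIM (what is proved, stated in full; the proofs are below) =====
def Claim_equal_count_table_rows : Prop := ∀ (lines : List String) (headings : List String), Dom_count_table_rows lines headings → Spec_count_table_rows lines headings (count_table_rows lines headings)

-- ===== LEMMAS AND PROOFS =====

-- proof-side helper: the stripped '|'-lines of the section region (stop at "### ")
def tblOf (lines : List String) : List String :=
  match lines with
  | [] => []
  | line :: rest =>
    if PySem.Str.startswith line "### " then []
    else
      let t := PySem.Str.strip line
      if PySem.Str.startswith t "|" then t :: tblOf rest
      else tblOf rest

-- tblOf computes strip-of-filtered section block (A's table_lines over the suffix)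
theorem tblOf_eq (lines : List String) :
    tblOf lines =
      ((sectionLoop lines).filter
        (fun line => PySem.Str.startswith (PySem.Str.strip line) "|")).map PySem.Str.strip := by
  induction lines with
  | nil => rfl
  | cons l rest ih =>
    simp only [tblOf, sectionLoop]
    by_cases h1 : PySem.Str.startswith l "### " = true
    · rw [if_pos h1, if_pos h1]; rfl
    · rw [if_neg h1, if_neg h1, List.filter_cons]
      by_cases h2 : PySem.Str.startswith (PySem.Str.strip l) "|" = true
      · rw [if_pos h2, if_pos h2, List.map_cons, ih]
      · rw [if_neg h2, if_neg h2, ih]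

theorem fs_nonneg (lines headings : List String) (i : Int) (hi : 0 ≤ i) :
    findSectionAux lines headings i = -1 ∨ i ≤ findSectionAux lines headings i := by
  induction lines generalizing i with
  | nil => left; rfl
  | cons l rest ih =>
    simp only [findSectionAux]
    split_ifs with h
    · right; exact le_refl i
    · rcases ih (i + 1) (by omega) with h' | h'
      · left; exact h'
      · right; omega

theorem fs_shift (lines headings : List String) (i : Int) (hi : 0 ≤ i) :
    (findSectionAux lines headings (i + 1) = -1 ↔ findSectionAux lines headings i = -1) ∧
    (findSectionAux lines headings i ≠ -1 →
      findSectionAux lines headings (i + 1) = findSectionAux lines headings i + 1) := by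
  induction lines generalizing i with
  | nil => exact ⟨Iff.rfl, fun h => absurd rfl h⟩
  | cons l rest ih =>
    simp only [findSectionAux]
    split_ifs with h
    · exact ⟨by constructor <;> intro h' <;> omega, fun _ => rfl⟩
    · exact ih (i + 1) (by omega)

-- replace with a single-char pattern and empty replacement is a filter
theorem replace_go_filter (c : Char) (fuel : Nat) (l acc : List Char) (hf : l.length ≤ fuel) :
    PySem.Chars.replace.go [c] [] fuel l acc = acc.reverse ++ l.filter (fun x => !(x == c)) := by
  induction fuel generalizing l acc with
  | zero =>
    have : l = [] := List.length_eq_zero_iff.mp (Nat.le_zero.mp hf)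
    subst this; rfl
  | succ fuel ih =>
    cases l with
    | nil => simp [PySem.Chars.replace.go]
    | cons x t =>
      simp only [PySem.Chars.replace.go, List.isPrefixOf, List.filter_cons]
      by_cases hx : (c == x) = true
      · have hx' : (x == c) = true := by rw [Bool.beq_comm]; exact hx
        simp [hx, hx', ih t acc (by simpa using Nat.le_of_succ_le_succ hf)]
      · have hx2 : (c == x) = false := Bool.eq_false_iff.mpr hx
        have hx' : (x == c) = false := by rw [Bool.beq_comm]; exact hx2
        simp [hx2, hx', ih t (x :: acc) (by simpa using Nat.le_of_succ_le_succ hf)]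

theorem replace_single_filter (cs : List Char) (c : Char) :
    PySem.Chars.replace cs [c] [] = cs.filter (fun x => !(x == c)) := by
  have h : ([c] : List Char).isEmpty = false := rfl
  rw [PySem.Chars.replace, h]
  simp only [Bool.false_eq_true, if_neg (by simp : ¬ False)]
  simpa using replace_go_filter c cs.length cs [] (le_refl _)

-- helper: a surviving filtered char outside "-:" exists iff some char of cs is outside "|: -"
theorem any_bad_filter (cs : List Char) :
    ((cs.filter (fun x => !(x == '|'))).filter (fun x => !(x == ' '))).any
        (fun ch => !(ch == '-' || ch == ':'))
    = !(cs.all (fun c => "|: -".toList.contains c)) := by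
  induction cs with
  | nil => rfl
  | cons c t ih =>
    simp only [List.filter_cons, List.all_cons]
    by_cases h1 : c = '|'
    · subst h1; simpa using ih
    · by_cases h2 : c = ' '
      · subst h2; simpa using ih
      · by_cases h3 : c = '-'
        · subst h3; simpa using ih
        · by_cases h4 : c = ':'
          · subst h4; simpa using ih
          · have hc : ("|: -".toList.contains c) = false := by
              rw [show "|: -".toList = ['|', ':', ' ', '-'] from rfl]; simp [h1, h2, h3, h4]
            simp [h1, h2, h3, h4]

-- the char-level fact: A's replace-based separator test equals B's per-char test
theorem sep_chars_eq (cs : List Char) :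
    (decide ((cs.filter (fun x => !(x == '|'))).filter (fun x => !(x == ' ')) = []) ||
      ((cs.filter (fun x => !(x == '|'))).filter (fun x => !(x == ' '))).any
        (fun ch => !(ch == '-' || ch == ':'))) =
    !(cs.all (fun c => "|: -".toList.contains c) && cs.any (fun c => "-:".toList.contains c)) := by
  induction cs with
  | nil => rfl
  | cons c t ih =>
    simp only [List.filter_cons, List.all_cons, List.any_cons]
    by_cases h1 : c = '|'
    · subst h1; simpa using ih
    · by_cases h2 : c = ' '
      · subst h2; simpa using ih
      · by_cases h3 : c = '-'
        · subst h3
          simpa using any_bad_filter t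
        · by_cases h4 : c = ':'
          · subst h4
            simpa using any_bad_filter t
          · have hc : ("|: -".toList.contains c) = false := by
              rw [show "|: -".toList = ['|', ':', ' ', '-'] from rfl]; simp [h1, h2, h3, h4]
            simp [h1, h2, h3, h4]

-- the scan phase of altLoop, characterized by tblOf
theorem altLoop_scan (lines headings : List String) (n : Int) (sepOk : Bool) (hn : 0 ≤ n) :
    altLoop lines headings true n sepOk =
      (true, n + (tblOf lines).length,
        if n < 2 ∧ 2 ≤ n + (tblOf lines).length then
          altSepOk ((tblOf lines).getD (1 - n).toNat "")
        else sepOk) := by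
  induction lines generalizing n sepOk with
  | nil =>
    simp only [altLoop, tblOf, List.length_nil]
    rw [if_neg (by omega)]
    simp
  | cons l rest ih =>
    simp only [altLoop, tblOf]
    rw [if_neg (by simp : ¬ (true = false))]
    by_cases h1 : PySem.Str.startswith l "### " = true
    · rw [if_pos h1, if_pos h1]
      simp only [List.length_nil]
      rw [if_neg (by omega)]
      simp
    · rw [if_neg h1, if_neg h1]
      by_cases h2 : PySem.Str.startswith (PySem.Str.strip l) "|" = true
      · rw [if_pos h2, if_pos h2]
        rw [ih (n + 1) _ (by omega)]
        simp only [List.length_cons, Prod.mk.injEq]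
        refine ⟨trivial, by push_cast; ring, ?_⟩
        set T := tblOf rest with hT
        by_cases hn0 : n = 0
        · subst hn0
          by_cases hlen : 1 ≤ T.length
          · rw [if_pos (show (0:Int)+1 < 2 ∧ 2 ≤ 0+1+(T.length:Int) from ⟨by omega, by omega⟩),
                if_pos (show (0:Int) < 2 ∧ 2 ≤ 0 + ((T.length + 1 : Nat) : Int) from
                  ⟨by omega, by push_cast; omega⟩)]
            norm_num [List.getD_cons_succ]
          · have hz : T = [] := List.length_eq_zero_iff.mp (by omega)
            rw [hz]
            norm_num
        · by_cases hn1 : n = 1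
          · subst hn1
            rw [if_neg (show ¬((1:Int)+1 < 2 ∧ 2 ≤ 1+1+(T.length:Int)) from by omega),
                if_pos (show (1:Int) < 2 ∧ 2 ≤ 1 + ((T.length + 1 : Nat) : Int) from
                  ⟨by omega, by push_cast; omega⟩)]
            norm_num
          · have hb : ((n + 1 == 2) : Bool) = false := by
              rw [beq_eq_false_iff_ne]; omega
            rw [if_neg (show ¬(n+1 < 2 ∧ 2 ≤ n+1+(T.length:Int)) from by omega),
                if_neg (show ¬(n < 2 ∧ 2 ≤ n + ((T.length + 1 : Nat) : Int)) from by push_cast; omega),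
                hb]
            simp
      · rw [if_neg h2, if_neg h2]
        exact ih n sepOk hn

-- String equality with "" seen on toList
theorem beq_empty_eq (s : String) : (s == "") = decide (s.toList = []) := by
  simp only [String.toList_eq_nil_iff]
  rcases instDecidableEqString s "" with h | h
  · simp [h]
  · simp [h]

-- the final decision agrees once the table list and sep flag are known
theorem tail_eq (T : List String) :
    (if T.length < 3 then (0 : Int)
     else
       if (PySem.Str.replace (PySem.Str.replace (T.getD 1 "") "|" "") " " "" == ""
           || (PySem.Str.replace (PySem.Str.replace (T.getD 1 "") "|" "") " " "").toList.any
                (fun ch => !(ch == '-' || ch == ':'))) then 0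
       else max 0 ((T.length : Int) - 2)) =
    (if (true : Bool) = false ∨ 0 + (T.length : Int) < 3 ∨
        (if (0:Int) < 2 ∧ 2 ≤ 0 + (T.length : Int) then altSepOk (T.getD (1 - (0:Int)).toNat "") else false) = false
     then 0 else 0 + (T.length : Int) - 2) := by
  by_cases hlen : T.length < 3
  · rw [if_pos hlen, if_pos (by right; left; omega)]
  · rw [if_neg hlen]
    have hc : (0:Int) < 2 ∧ 2 ≤ 0 + (T.length : Int) := ⟨by omega, by omega⟩
    rw [if_pos hc]
    have hidx : ((1 : Int) - 0).toNat = 1 := by norm_num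
    rw [hidx]
    set t := T.getD 1 "" with ht
    set sep := PySem.Str.replace (PySem.Str.replace t "|" "") " " "" with hsep
    have hrep : sep.toList = (t.toList.filter (fun x => !(x == '|'))).filter (fun x => !(x == ' ')) := by
      rw [hsep]
      simp only [PySem.Str.toList_replace]
      rw [show ("|" : String).toList = ['|'] from rfl, show (" " : String).toList = [' '] from rfl,
          show ("" : String).toList = [] from rfl]
      rw [replace_single_filter, replace_single_filter]
    have key : (sep == "" || sep.toList.any (fun ch => !(ch == '-' || ch == ':'))) = !(altSepOk t) := by
      rw [beq_empty_eq, hrep, altSepOk]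
      exact sep_chars_eq t.toList
    by_cases hok : altSepOk t = true
    · rw [if_neg (by rw [key, hok]; simp), if_neg (by push_cast at hlen ⊢; simp [hok]; omega)]
      push_cast at hlen ⊢; omega
    · have hokf : altSepOk t = false := Bool.eq_false_iff.mpr hok
      rw [if_pos (by rw [key, hokf]; simp), if_pos (by right; right; rw [hokf])]

theorem main_eq (lines headings : List String) :
    count_table_rows lines headings = count_table_rows_alt lines headings := by
  induction lines with
  | nil => rfl
  | cons l rest ih =>
    by_cases h : (headings.any fun h => PySem.Str.strip l == h || PySem.Str.startswith (PySem.Str.strip l) h) = true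
    · -- head matches: A computes the tail over `rest`; B enters the scan phase on `rest`
      have hA : find_section (l :: rest) headings = 0 := by
        simp only [find_section, findSectionAux, if_pos h]
      have hblock : get_section_block (l :: rest) 0 = sectionLoop rest := by
        simp only [get_section_block]
        rw [if_neg (by omega : ¬ (0 : Int) < 0)]
        norm_num
      have hB : altLoop (l :: rest) headings false 0 false = altLoop rest headings true 0 false := by
        simp only [altLoop, if_true]
        rw [if_pos h]
      simp only [count_table_rows, count_table_rows_alt, hA, hblock, hB]
      rw [altLoop_scan rest headings 0 false (le_refl 0), ← tblOf_eq]
      exact tail_eq (tblOf rest)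
    · -- head does not match: both reduce to `rest`
      have hBstep : count_table_rows_alt (l :: rest) headings = count_table_rows_alt rest headings := by
        simp only [count_table_rows_alt, altLoop, if_true]
        rw [if_neg h]
      have hAfind : findSectionAux (l :: rest) headings 0 = findSectionAux rest headings 1 := by
        simp only [findSectionAux, if_neg h, zero_add]
      have hshift := fs_shift rest headings 0 (le_refl 0)
      rw [hBstep, ← ih]
      by_cases hm : findSectionAux rest headings 0 = -1
      · have h1 : findSectionAux rest headings 1 = -1 := by
          have := hshift.1.mpr hm; rwa [zero_add] at this
        have e1 : count_table_rows (l :: rest) headings = 0 := by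
          simp only [count_table_rows, find_section, hAfind, h1, get_section_block]
          rw [if_pos (by omega : (-1 : Int) < 0)]
          rfl
        have e2 : count_table_rows rest headings = 0 := by
          simp only [count_table_rows, find_section, hm, get_section_block]
          rw [if_pos (by omega : (-1 : Int) < 0)]
          rfl
        rw [e1, e2]
      · have h1 : findSectionAux rest headings 1 = findSectionAux rest headings 0 + 1 := by
          have := hshift.2 hm; rwa [zero_add] at this
        have hge : 0 ≤ findSectionAux rest headings 0 := by
          rcases fs_nonneg rest headings 0 (le_refl 0) with h' | h'
          · exact absurd h' hm
          · exact h'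
        have hdrop : (l :: rest).drop (findSectionAux rest headings 0 + 1 + 1).toNat
            = rest.drop (findSectionAux rest headings 0 + 1).toNat := by
          have hn : (findSectionAux rest headings 0 + 1 + 1).toNat
              = (findSectionAux rest headings 0 + 1).toNat + 1 := by omega
          rw [hn, List.drop_succ_cons]
        simp only [count_table_rows, find_section, hAfind, h1, get_section_block]
        rw [if_neg (by omega : ¬ findSectionAux rest headings 0 + 1 < 0),
            if_neg (by omega : ¬ findSectionAux rest headings 0 < 0), hdrop]

-- ===== VERDICT (by name: the statement is the Claim_ definition above) =====
theorem count_table_rows_spec : Claim_equal_count_table_rows := by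
  intro lines headings _
  unfold Spec_count_table_rows
  exact main_eq lines headings
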